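-- pv_equiv track=rewrite | github.com/PPZeen/Comprog_graders | 09_MoreDC_34.py | pattern1
-- ===== SOURCE A (Python) =====
-- def pattern1(nrows, ncols):
--     tab = []
--     k=1
--     for i in range(nrows):
--         subtab = []
--         for j in range(ncols):
--             subtab.append(k)
--             k+=1
--         tab.append(subtab)
--     return tab
-- ===== SOURCE B (Python) =====
-- def pattern1(nrows, ncols):
--     # Row recurrence: the first row is 1..ncols; every later row is the
--     # previous row shifted elementwise by ncols. No cell counter, no nested
--     # counting loop: rows are whole-list values produced from each other.
--     if nrows <= 0:
--         return []
--     tab = []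
--     row = list(range(1, ncols + 1))
--     for _ in range(nrows):
--         tab.append(row)
--         row = [x + ncols for x in row]
--     return tab
-- ===== Notes on version B (the rewrite author's own statement) =====
-- stated objective: alternative
-- what changed: Replaces A's scalar cell counter threaded through nested loops with a whole-row recurrence: the first row is built as 1..ncols and each subsequent row is the previous row shifted elementwise by ncols, so rows are produced from each other as list values with no per-cell counter.
import Mathlib
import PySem

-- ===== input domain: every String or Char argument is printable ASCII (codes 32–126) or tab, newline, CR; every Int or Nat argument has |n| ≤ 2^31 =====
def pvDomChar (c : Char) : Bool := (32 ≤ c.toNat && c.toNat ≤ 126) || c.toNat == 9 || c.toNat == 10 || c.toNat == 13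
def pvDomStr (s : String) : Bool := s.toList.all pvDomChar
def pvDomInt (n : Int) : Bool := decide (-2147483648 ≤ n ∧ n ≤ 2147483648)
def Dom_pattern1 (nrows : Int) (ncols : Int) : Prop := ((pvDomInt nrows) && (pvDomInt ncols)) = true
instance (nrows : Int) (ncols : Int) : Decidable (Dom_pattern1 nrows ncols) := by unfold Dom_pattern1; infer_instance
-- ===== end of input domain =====

-- B replaces A's threaded scalar cell counter with a whole-row recurrence (first row 1..ncols,
-- each next row the previous row shifted elementwise by ncols); equal return value, no speed claim.


-- ===== PORT A =====
-- literal port of A: nested foldl threading the counter k through (tab, k) state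
def pattern1 (nrows : Int) (ncols : Int) : List (List Int) :=
  ((PySem.List.pyRange 0 nrows 1).foldl
    (fun (st : List (List Int) × Int) _i =>
      let inner := (PySem.List.pyRange 0 ncols 1).foldl
        (fun (st2 : List Int × Int) _j => (st2.1 ++ [st2.2], st2.2 + 1)) ([], st.2)
      (st.1 ++ [inner.1], inner.2))
    ([], 1)).1

-- ===== PORT B =====
-- port of B: row = list(range(1, ncols+1)); each step appends row and shifts it elementwise by ncols
def pattern1_alt (nrows : Int) (ncols : Int) : List (List Int) :=
  if nrows ≤ 0 then []
  else
  ((PySem.List.pyRange 0 nrows 1).foldl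
    (fun (st : List (List Int) × List Int) _i =>
      (st.1 ++ [st.2], st.2.map (fun x => x + ncols)))
    ([], PySem.List.pyRange 1 (ncols + 1) 1)).1

-- ===== PRECONDITION & SPEC =====
def Spec_pattern1 (nrows : Int) (ncols : Int) (out : List (List Int)) : Prop := out = pattern1_alt nrows ncols
instance (nrows : Int) (ncols : Int) (out : List (List Int)) : Decidable (Spec_pattern1 nrows ncols out) := by unfold Spec_pattern1; infer_instance

-- ===== CLAIM (what is proved, stated in full; the proofs are below) =====
def Claim_equal_pattern1 : Prop := ∀ (nrows : Int) (ncols : Int), Dom_pattern1 nrows ncols → Spec_pattern1 nrows ncols (pattern1 nrows ncols)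

-- ===== LEMMAS AND PROOFS =====

-- common closed form both ports are reduced to
def gridForm (nrows : Int) (ncols : Int) : List (List Int) :=
  (PySem.List.pyRange 0 nrows 1).map
    (fun i => PySem.List.pyRange (i * ncols + 1) (i * ncols + ncols + 1) 1)

-- two integer ranges with step 1 are equal iff same length and (when nonempty) same start
lemma pyRange_one_eq_of_len (a b c d : Int) (hlen : (b - a).toNat = (d - c).toNat)
    (hstart : (b - a).toNat = 0 ∨ a = c) :
    PySem.List.pyRange a b 1 = PySem.List.pyRange c d 1 := by
  rw [PySem.List.pyRange_one, PySem.List.pyRange_one, ← hlen]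
  rcases hstart with h | h
  · simp [h]
  · simp [h]

-- A's inner loop appends len(l) consecutive integers starting at k
lemma inner_fold_eq (l : List Int) (acc : List Int) (k : Int) :
    l.foldl (fun (st2 : List Int × Int) _j => (st2.1 ++ [st2.2], st2.2 + 1)) (acc, k)
      = (acc ++ PySem.List.pyRange k (k + l.length) 1, k + l.length) := by
  induction l generalizing acc k with
  | nil => simp [PySem.List.pyRange_one_eq_nil (le_refl k)]
  | cons x xs ih =>
    simp only [List.foldl_cons, ih (acc ++ [k]) (k + 1), List.length_cons, Prod.mk.injEq]
    refine ⟨?_, by push_cast; ring⟩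
    push_cast
    rw [show (k + ((xs.length : Int) + 1)) = k + (xs.length : Int) + 1 from by ring]
    rw [PySem.List.pyRange_one_cons (show k < k + (xs.length : Int) + 1 by omega)]
    rw [show (k + 1 + (xs.length : Int)) = k + (xs.length : Int) + 1 from by ring]
    simp

-- A's outer loop, started at counter 1, produces exactly the closed form's rows
lemma outer_fold_eq (ncols : Int) (n : Nat) :
    (PySem.List.pyRange 0 n 1).foldl
      (fun (st : List (List Int) × Int) _i =>
        let inner := (PySem.List.pyRange 0 ncols 1).foldl
          (fun (st2 : List Int × Int) _j => (st2.1 ++ [st2.2], st2.2 + 1)) ([], st.2)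
        (st.1 ++ [inner.1], inner.2))
      ([], 1)
    = ((PySem.List.pyRange 0 n 1).map
        (fun i => PySem.List.pyRange (i * ncols + 1) (i * ncols + ncols + 1) 1),
       1 + (n : Int) * (ncols.toNat : Int)) := by
  induction n with
  | zero => simp [PySem.List.pyRange_one_eq_nil (le_refl (0 : Int))]
  | succ m ih =>
    have hsplit : PySem.List.pyRange 0 ((m + 1 : Nat) : Int) 1
        = PySem.List.pyRange 0 (m : Int) 1 ++ [(m : Int)] := by
      have := PySem.List.pyRange_one_succ_right (a := (0 : Int)) (b := (m : Int))
        (Int.natCast_nonneg m)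
      push_cast
      push_cast at this
      exact this
    rw [hsplit, List.foldl_append, List.map_append, ih]
    simp only [List.foldl_cons, List.foldl_nil, inner_fold_eq, List.map_cons, List.map_nil,
      PySem.List.length_pyRange_one, Prod.mk.injEq]
    refine ⟨?_, ?_⟩
    · simp only [List.nil_append, Int.sub_zero]
      congr 1
      refine congrArg (fun r => [r]) ?_
      apply pyRange_one_eq_of_len
      · rw [add_sub_cancel_left]
        rw [show ((m : Int) * ncols + ncols + 1 - ((m : Int) * ncols + 1)) = ncols from by ring]
        omega
      · rcases le_or_gt 0 ncols with h | h
        · right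
          rw [Int.toNat_of_nonneg h, add_comm]
        · left
          rw [add_sub_cancel_left]
          omega
    · push_cast; ring

lemma pattern1_eq_gridForm (nrows ncols : Int) : pattern1 nrows ncols = gridForm nrows ncols := by
  unfold pattern1 gridForm
  have hr : PySem.List.pyRange 0 nrows 1 = PySem.List.pyRange 0 (nrows.toNat : Int) 1 := by
    apply pyRange_one_eq_of_len <;> omega
  rw [hr, outer_fold_eq]

-- shifting an integer range elementwise shifts its bounds
lemma map_add_pyRange (s e d : Int) :
    (PySem.List.pyRange s e 1).map (fun x => x + d) = PySem.List.pyRange (s + d) (e + d) 1 := by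
  rw [PySem.List.pyRange_one, PySem.List.pyRange_one, List.map_map]
  have hlen : (e - s).toNat = (e + d - (s + d)).toNat := by omega
  rw [← hlen]
  refine List.map_congr_left (fun k _ => ?_)
  simp [Function.comp]; ring

-- B's loop: starting from the row for index b, each step emits the current row and shifts it
lemma shift_fold_eq (ncols : Int) (m : Nat) (b : Int) (acc : List (List Int)) :
    (PySem.List.pyRange b (b + (m : Int)) 1).foldl
      (fun (st : List (List Int) × List Int) _i =>
        (st.1 ++ [st.2], st.2.map (fun x => x + ncols)))
      (acc, PySem.List.pyRange (b * ncols + 1) (b * ncols + ncols + 1) 1)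
    = (acc ++ (PySem.List.pyRange b (b + (m : Int)) 1).map
        (fun i => PySem.List.pyRange (i * ncols + 1) (i * ncols + ncols + 1) 1),
       PySem.List.pyRange ((b + (m : Int)) * ncols + 1) ((b + (m : Int)) * ncols + ncols + 1) 1) := by
  induction m generalizing b acc with
  | zero => simp [PySem.List.pyRange_one_eq_nil (le_refl b)]
  | succ m ih =>
    have hcons : PySem.List.pyRange b (b + ((m + 1 : Nat) : Int)) 1
        = b :: PySem.List.pyRange (b + 1) (b + ((m + 1 : Nat) : Int)) 1 :=
      PySem.List.pyRange_one_cons (by push_cast; omega)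
    rw [hcons, List.foldl_cons, map_add_pyRange]
    have hshift : PySem.List.pyRange (b * ncols + 1 + ncols) (b * ncols + ncols + 1 + ncols) 1
        = PySem.List.pyRange ((b + 1) * ncols + 1) ((b + 1) * ncols + ncols + 1) 1 := by
      rw [show b * ncols + 1 + ncols = (b + 1) * ncols + 1 from by ring,
          show b * ncols + ncols + 1 + ncols = (b + 1) * ncols + ncols + 1 from by ring]
    rw [hshift]
    have hr2 : PySem.List.pyRange (b + 1) (b + ((m + 1 : Nat) : Int)) 1
        = PySem.List.pyRange (b + 1) (b + 1 + (m : Int)) 1 := by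
      apply pyRange_one_eq_of_len
      · push_cast; omega
      · right; rfl
    rw [hr2]
    rw [ih (b + 1) (acc ++ [PySem.List.pyRange (b * ncols + 1) (b * ncols + ncols + 1) 1])]
    rw [List.map_cons]
    simp
    congr 2 <;> ring

lemma pattern1_alt_eq_gridForm (nrows ncols : Int) : pattern1_alt nrows ncols = gridForm nrows ncols := by
  unfold pattern1_alt gridForm
  rcases le_or_gt nrows 0 with hn | hn
  · simp [PySem.List.pyRange_one_eq_nil hn]
  · rw [if_neg (by omega)]
    have key := shift_fold_eq ncols nrows.toNat 0 []
    simp only [zero_add, zero_mul, List.nil_append] at key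
    have hnn : nrows = ((nrows.toNat : Nat) : Int) := by omega
    rw [hnn, key]

-- ===== VERDICT (by name: the statement is the Claim_ definition above) =====
theorem pattern1_spec : Claim_equal_pattern1 := by
  intro nrows ncols _
  unfold Spec_pattern1
  rw [pattern1_eq_gridForm, pattern1_alt_eq_gridForm]
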